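-- pv_equiv track=rewrite | github.com/lnhutminh/GBFS | GBFS.py | findSE
-- ===== SOURCE A (Python) =====
-- def findSE(maze): # Return the pos of start node and end node.
--     for i in range(len(maze)):
--       for j in range(len(maze[0])):
--           if maze[i][j]=='S': # Find start node
--               start=(i,j)
--           elif maze[i][j]==' ': # Find end node
--               if (i==0) or (i==len(maze)-1) or (j==0) or (j==len(maze[0])-1):
--                   end=(i,j)
--           else:
--               pass
--     return start, end
-- ===== SOURCE B (Python) =====
-- def findSE(maze):
--     h = len(maze)
--     w = len(maze[0]) if h else 0
--     # Pass 1: last 'S' in row-major order (within the width of the first row).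
--     for i in range(h):
--         row = maze[i]
--         for j in range(w):
--             if row[j] == 'S':
--                 start = (i, j)
--     # Pass 2: walk only the border cells, in row-major order.
--     if w:
--         for j in range(w):
--             if maze[0][j] == ' ':
--                 end = (0, j)
--         for i in range(1, h - 1):
--             if maze[i][0] == ' ':
--                 end = (i, 0)
--             if maze[i][w - 1] == ' ':
--                 end = (i, w - 1)
--         if h > 1:
--             for j in range(w):
--                 if maze[h - 1][j] == ' ':
--                     end = (h - 1, j)
--     return start, end
-- ===== Notes on version B (the rewrite author's own statement) =====
-- stated objective: alternative
-- what changed: A finds both positions in one nested scan with a three-branch conditional per cell; B decomposes into two passes: a full scan that only tracks the last 'S', then a walk over just the border frame (top row, interior edge columns, bottom row) in row-major order that tracks the last border space.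
import Mathlib
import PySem

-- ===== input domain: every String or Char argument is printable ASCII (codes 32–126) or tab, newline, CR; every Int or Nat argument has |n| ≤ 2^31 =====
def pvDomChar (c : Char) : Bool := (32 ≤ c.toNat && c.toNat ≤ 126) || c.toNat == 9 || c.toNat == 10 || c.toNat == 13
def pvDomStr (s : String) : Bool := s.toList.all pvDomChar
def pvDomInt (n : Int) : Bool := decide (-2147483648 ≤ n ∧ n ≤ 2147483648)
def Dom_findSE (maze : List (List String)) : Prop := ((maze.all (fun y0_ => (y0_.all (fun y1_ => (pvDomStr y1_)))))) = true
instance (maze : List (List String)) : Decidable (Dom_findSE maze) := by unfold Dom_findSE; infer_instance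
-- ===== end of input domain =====

-- B finds the start with a dedicated full scan and the end with a walk over only
-- the border frame (alternative decomposition; same return value as A's single
-- three-branch scan on every input where A returns).

-- shared helper: maze[i][j], total with "" default (indices in range under Pre_findSE)
def pvCell (maze : List (List String)) (i j : Nat) : String :=
  (maze.getD i []).getD j ""

-- ===== PORT A =====
-- single row-major scan over range(len(maze)) × range(len(maze[0])); start/end
-- carried as Options (none = Python's unbound local, excluded by Pre_findSE);
-- the final .getD (0,0) is a totality default only, never reached under Pre_.
def findSE (maze : List (List String)) : (Int × Int) × (Int × Int) :=
  let res : Option (Int × Int) × Option (Int × Int) :=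
    (List.range maze.length).foldl (fun st i =>
      (List.range (maze.getD 0 []).length).foldl (fun st j =>
        if pvCell maze i j = "S" then (some ((i : Int), (j : Int)), st.2)
        else if pvCell maze i j = " " then
          if i = 0 ∨ i = maze.length - 1 ∨ j = 0 ∨ j = (maze.getD 0 []).length - 1 then
            (st.1, some ((i : Int), (j : Int)))
          else st
        else st) st) (none, none)
  (res.1.getD (0, 0), res.2.getD (0, 0))

-- ===== PORT B =====
-- pass 1: last 'S' over the whole scanned grid; pass 2: border walk (top row,
-- interior edge columns, bottom row).  The Nat subtractions w-1 / h-1 only occur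
-- under the guards w ≠ 0 / h > 1, where they equal Python's int subtraction.
def findSE_alt (maze : List (List String)) : (Int × Int) × (Int × Int) :=
  let h := maze.length
  let w := (maze.getD 0 []).length
  let start : Option (Int × Int) :=
    (List.range h).foldl (fun s i =>
      (List.range w).foldl (fun s j =>
        if pvCell maze i j = "S" then some ((i : Int), (j : Int)) else s) s) none
  let e : Option (Int × Int) :=
    if w ≠ 0 then
      let e0 := (List.range w).foldl (fun e j =>
        if pvCell maze 0 j = " " then some ((0 : Int), (j : Int)) else e) none
      let e1 := (List.range' 1 (h - 1 - 1)).foldl (fun e i =>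
        let e' := if pvCell maze i 0 = " " then some ((i : Int), (0 : Int)) else e
        if pvCell maze i (w - 1) = " " then some ((i : Int), ((w - 1 : Nat) : Int)) else e') e0
      if h > 1 then
        (List.range w).foldl (fun e j =>
          if pvCell maze (h - 1) j = " " then some (((h - 1 : Nat) : Int), (j : Int)) else e) e1
      else e1
    else none
  (start.getD (0, 0), e.getD (0, 0))

-- ===== PRECONDITION & SPEC =====
-- Pre_ admits exactly the inputs where Python A returns: a nonempty maze whose
-- rows are at least as long as the first row (else IndexError), containing an
-- 'S' and a border space within the first len(maze[0]) columns (else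
-- UnboundLocalError on start/end).
def Pre_findSE (maze : List (List String)) : Prop :=
  maze ≠ [] ∧
  (∀ row ∈ maze, (maze.getD 0 []).length ≤ row.length) ∧
  (∃ i ∈ List.range maze.length, ∃ j ∈ List.range (maze.getD 0 []).length,
      pvCell maze i j = "S") ∧
  (∃ i ∈ List.range maze.length, ∃ j ∈ List.range (maze.getD 0 []).length,
      pvCell maze i j = " " ∧
      (i = 0 ∨ i = maze.length - 1 ∨ j = 0 ∨ j = (maze.getD 0 []).length - 1))
instance (maze : List (List String)) : Decidable (Pre_findSE maze) := by
  unfold Pre_findSE; infer_instance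

def pvWitness_findSE : List (List String) := [["S", " "]]

def Spec_findSE (maze : List (List String)) (out : (Int × Int) × (Int × Int)) : Prop := out = findSE_alt maze
instance (maze : List (List String)) (out : (Int × Int) × (Int × Int)) : Decidable (Spec_findSE maze out) := by unfold Spec_findSE; infer_instance

-- ===== CLAIM (what is proved, stated in full; the proofs are below) =====
def Claim_equal_findSE : Prop := ∀ (maze : List (List String)), Dom_findSE maze → Pre_findSE maze → Spec_findSE maze (findSE maze)

-- ===== LEMMAS AND PROOFS =====

-- A's pair-state fold splits into two independent folds
theorem pv_foldl_pair {α β γ : Type} (f : α → γ → α) (g : β → γ → β)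
    (l : List γ) (a : α) (b : β) :
    l.foldl (fun s x => (f s.1 x, g s.2 x)) (a, b) = (l.foldl f a, l.foldl g b) := by
  induction l generalizing a b with
  | nil => rfl
  | cons x xs ih => simpa using ih (f a x) (g b x)

-- the start fold both ports compute (last 'S' in row-major order)
def pvSA (maze : List (List String)) : Option (Int × Int) :=
  (List.range maze.length).foldl (fun s i =>
    (List.range (maze.getD 0 []).length).foldl (fun s j =>
      if pvCell maze i j = "S" then some ((i : Int), (j : Int)) else s) s) none

-- A's end update for one cell
def pvGstep (maze : List (List String)) (i : Nat) (b : Option (Int × Int)) (j : Nat) :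
    Option (Int × Int) :=
  if pvCell maze i j = " " ∧
      (i = 0 ∨ i = maze.length - 1 ∨ j = 0 ∨ j = (maze.getD 0 []).length - 1) then
    some ((i : Int), (j : Int))
  else b

-- A's end fold (last border space, full scan)
def pvEA (maze : List (List String)) : Option (Int × Int) :=
  (List.range maze.length).foldl (fun b i =>
    (List.range (maze.getD 0 []).length).foldl (pvGstep maze i) b) none

-- B's end fold (border walk)
def pvEB (maze : List (List String)) : Option (Int × Int) :=
  if (maze.getD 0 []).length ≠ 0 then
    let e0 := (List.range (maze.getD 0 []).length).foldl (fun e j =>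
      if pvCell maze 0 j = " " then some ((0 : Int), (j : Int)) else e) none
    let e1 := (List.range' 1 (maze.length - 1 - 1)).foldl (fun e i =>
      let e' := if pvCell maze i 0 = " " then some ((i : Int), (0 : Int)) else e
      if pvCell maze i ((maze.getD 0 []).length - 1) = " " then
        some ((i : Int), (((maze.getD 0 []).length - 1 : Nat) : Int)) else e') e0
    if maze.length > 1 then
      (List.range (maze.getD 0 []).length).foldl (fun e j =>
        if pvCell maze (maze.length - 1) j = " " then
          some (((maze.length - 1 : Nat) : Int), (j : Int)) else e) e1
    else e1
  else none

theorem pv_findSE_decomp (maze : List (List String)) :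
    findSE maze = ((pvSA maze).getD (0, 0), (pvEA maze).getD (0, 0)) := by
  unfold findSE pvSA pvEA
  have houter :
      (fun (st : Option (Int × Int) × Option (Int × Int)) (i : Nat) =>
        (List.range (maze.getD 0 []).length).foldl (fun st j =>
          if pvCell maze i j = "S" then (some ((i : Int), (j : Int)), st.2)
          else if pvCell maze i j = " " then
            if i = 0 ∨ i = maze.length - 1 ∨ j = 0 ∨ j = (maze.getD 0 []).length - 1 then
              (st.1, some ((i : Int), (j : Int)))
            else st
          else st) st)
      = fun st i =>
        ((List.range (maze.getD 0 []).length).foldl (fun s j =>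
            if pvCell maze i j = "S" then some ((i : Int), (j : Int)) else s) st.1,
         (List.range (maze.getD 0 []).length).foldl (pvGstep maze i) st.2) := by
    funext st i
    have hstep :
        (fun (st : Option (Int × Int) × Option (Int × Int)) (j : Nat) =>
          if pvCell maze i j = "S" then (some ((i : Int), (j : Int)), st.2)
          else if pvCell maze i j = " " then
            if i = 0 ∨ i = maze.length - 1 ∨ j = 0 ∨ j = (maze.getD 0 []).length - 1 then
              (st.1, some ((i : Int), (j : Int)))
            else st
          else st)
        = fun st j =>
          ((fun s j => if pvCell maze i j = "S" then some ((i : Int), (j : Int)) else s) st.1 j,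
           pvGstep maze i st.2 j) := by
      funext st j
      simp only [pvGstep]
      by_cases hS : pvCell maze i j = "S"
      · have hB : ¬ pvCell maze i j = " " := by rw [hS]; decide
        rw [if_pos hS, if_pos hS, if_neg (fun h => hB h.1)]
      · by_cases hB : pvCell maze i j = " "
        · by_cases hc : (i = 0 ∨ i = maze.length - 1 ∨ j = 0 ∨ j = (maze.getD 0 []).length - 1)
          · rw [if_neg hS, if_pos hB, if_pos hc, if_neg hS, if_pos (And.intro hB hc)]
          · rw [if_neg hS, if_pos hB, if_neg hc, if_neg hS, if_neg (fun h => hc h.2)]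
        · rw [if_neg hS, if_neg hB, if_neg hS, if_neg (fun h => hB h.1)]
    rw [hstep]
    obtain ⟨a, b⟩ := st
    exact pv_foldl_pair
      (fun s j => if pvCell maze i j = "S" then some ((i : Int), (j : Int)) else s)
      (pvGstep maze i) (List.range (maze.getD 0 []).length) a b
  rw [houter]
  have hpair := pv_foldl_pair
    (fun s i => (List.range (maze.getD 0 []).length).foldl (fun s j =>
      if pvCell maze i j = "S" then some ((i : Int), (j : Int)) else s) s)
    (fun b i => (List.range (maze.getD 0 []).length).foldl (pvGstep maze i) b)
    (List.range maze.length) none none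
  rw [hpair]

theorem pv_findSE_alt_decomp (maze : List (List String)) :
    findSE_alt maze = ((pvSA maze).getD (0, 0), (pvEB maze).getD (0, 0)) := rfl

theorem pv_range_split (m : Nat) (h : 2 ≤ m) :
    List.range m = 0 :: (List.range' 1 (m - 2) ++ [m - 1]) := by
  rw [List.range_eq_range']
  have hm : m = 1 + ((m - 2) + 1) := by omega
  rw [hm, ← List.range'_append (step := 1)]
  simp
  rw [← List.range'_append (step := 1)]
  simp
  omega

theorem pv_foldl_id {l : List Nat} {b : Option (Int × Int)}
    {g : Option (Int × Int) → Nat → Option (Int × Int)}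
    (h : ∀ b x, x ∈ l → g b x = b) : l.foldl g b = b := by
  induction l generalizing b with
  | nil => rfl
  | cons x xs ih => rw [List.foldl_cons, h b x (by simp), ih (fun b y hy => h b y (by simp [hy]))]

theorem pv_row_top (maze : List (List String)) (b : Option (Int × Int)) :
    (List.range (maze.getD 0 []).length).foldl (pvGstep maze 0) b =
    (List.range (maze.getD 0 []).length).foldl (fun e j =>
      if pvCell maze 0 j = " " then some ((0 : Int), (j : Int)) else e) b := by
  apply PySem.List.foldl_congr_mem
  intro acc x _
  simp [pvGstep]

theorem pv_row_bot (maze : List (List String)) (b : Option (Int × Int)) :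
    (List.range (maze.getD 0 []).length).foldl (pvGstep maze (maze.length - 1)) b =
    (List.range (maze.getD 0 []).length).foldl (fun e j =>
      if pvCell maze (maze.length - 1) j = " " then
        some (((maze.length - 1 : Nat) : Int), (j : Int)) else e) b := by
  apply PySem.List.foldl_congr_mem
  intro acc x _
  simp [pvGstep]

theorem pv_row_mid (maze : List (List String)) (i w : Nat) (b : Option (Int × Int))
    (hwdef : (maze.getD 0 []).length = w)
    (hi0 : i ≠ 0) (hin : i ≠ maze.length - 1) (hw : 1 ≤ w) :
    (List.range w).foldl (pvGstep maze i) b =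
    (if pvCell maze i (w - 1) = " " then some ((i : Int), ((w - 1 : Nat) : Int))
      else if pvCell maze i 0 = " " then some ((i : Int), (0 : Int)) else b) := by
  have hg : pvGstep maze i = fun b j =>
      if pvCell maze i j = " " ∧ (i = 0 ∨ i = maze.length - 1 ∨ j = 0 ∨ j = w - 1) then
        some ((i : Int), (j : Int)) else b := by
    funext b' j; simp only [pvGstep, hwdef]
  rw [hg]
  rcases Nat.lt_or_ge w 2 with hw2 | hw2
  · have h1 : w = 1 := by omega
    subst h1
    simp only [List.range_one, List.foldl_cons, List.foldl_nil]
    by_cases hc : pvCell maze i 0 = " " <;> simp [hc]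
  · rw [pv_range_split w hw2, List.foldl_cons, List.foldl_append]
    have hmid : ∀ b' : Option (Int × Int),
        (List.range' 1 (w - 2)).foldl
          (fun b j => if pvCell maze i j = " " ∧
              (i = 0 ∨ i = maze.length - 1 ∨ j = 0 ∨ j = w - 1) then
            some ((i : Int), (j : Int)) else b) b' = b' := by
      intro b'
      apply pv_foldl_id
      intro b'' x hx
      have hx' := List.mem_range'_1.mp hx
      rw [if_neg]
      rintro ⟨-, h | h | h | h⟩ <;> omega
    rw [hmid]
    simp only [List.foldl_cons, List.foldl_nil]
    have h0w : ¬ ((0 : Nat) = w - 1) := by omega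
    by_cases hc0 : pvCell maze i 0 = " " <;>
      by_cases hc1 : pvCell maze i (w - 1) = " " <;>
        simp [hc0, hc1, h0w]

theorem pv_EA_eq_EB (maze : List (List String)) (hn : maze ≠ []) :
    pvEA maze = pvEB maze := by
  unfold pvEA pvEB
  by_cases hw : (maze.getD 0 []).length = 0
  · rw [hw, if_neg (by omega)]
    simp only [List.range_zero, List.foldl_nil]
    exact pv_foldl_id (fun _ _ _ => rfl)
  · have hw1 : 1 ≤ (maze.getD 0 []).length := Nat.pos_of_ne_zero hw
    rw [if_pos hw]
    simp only []
    by_cases hn2 : 2 ≤ maze.length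
    · have hmm : maze.length - 1 - 1 = maze.length - 2 := by omega
      rw [hmm, pv_range_split maze.length hn2, if_pos (by omega : maze.length > 1)]
      rw [List.foldl_cons, List.foldl_append, List.foldl_cons, List.foldl_nil]
      rw [pv_row_top maze none, pv_row_bot maze]
      congr 1
      apply PySem.List.foldl_congr_mem
      intro acc x hx
      have hx' := List.mem_range'_1.mp hx
      rw [pv_row_mid maze x _ acc rfl (by omega) (by omega) hw1]
    · have h1 : maze.length = 1 := by
        have : maze.length ≠ 0 := fun h => hn (List.eq_nil_of_length_eq_zero h)
        omega
      rw [h1, if_neg (by omega : ¬ (1:Nat) > 1)]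
      simp only [List.range_one, List.foldl_cons, List.foldl_nil]
      rw [pv_row_top maze none]
      rfl

-- ===== VERDICT (by name: the statement is the Claim_ definition above) =====
theorem findSE_spec : Claim_equal_findSE := by
  intro maze _ hpre
  unfold Spec_findSE
  rw [pv_findSE_decomp, pv_findSE_alt_decomp, pv_EA_eq_EB maze hpre.1]
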